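-- pv_equiv track=rewrite | github.com/VitaliKStud/video-labeler | src/video_labeler.py | _check_for_duplicates
-- ===== SOURCE A (Python) =====
-- def _check_for_duplicates(ordered_pairs):
--     """
--     Finding duplicates within a dictionary.
--     """
--     d = {}
--     for k, v in ordered_pairs:
--         if k in d:
--             d[k] = "Duplicated key"
--         else:
--             d[k] = v
--     return d
-- ===== SOURCE B (Python) =====
-- def _check_for_duplicates(ordered_pairs):
--     """
--     Finding duplicates within a dictionary.
--     """
--     pairs = list(ordered_pairs)
--     counts = {}
--     for k, _v in pairs:
--         counts[k] = counts.get(k, 0) + 1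
--     d = {}
--     for k, v in pairs:
--         if k not in d:
--             d[k] = v if counts[k] == 1 else "Duplicated key"
--     return d
-- ===== Notes on version B (the rewrite author's own statement) =====
-- stated objective: alternative
-- what changed: Replaces the incremental seen-before overwrite with a two-pass decomposition: first build a key-frequency table, then insert each key once at its first occurrence with its final value (original value if count is 1, else 'Duplicated key').
import Mathlib
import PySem

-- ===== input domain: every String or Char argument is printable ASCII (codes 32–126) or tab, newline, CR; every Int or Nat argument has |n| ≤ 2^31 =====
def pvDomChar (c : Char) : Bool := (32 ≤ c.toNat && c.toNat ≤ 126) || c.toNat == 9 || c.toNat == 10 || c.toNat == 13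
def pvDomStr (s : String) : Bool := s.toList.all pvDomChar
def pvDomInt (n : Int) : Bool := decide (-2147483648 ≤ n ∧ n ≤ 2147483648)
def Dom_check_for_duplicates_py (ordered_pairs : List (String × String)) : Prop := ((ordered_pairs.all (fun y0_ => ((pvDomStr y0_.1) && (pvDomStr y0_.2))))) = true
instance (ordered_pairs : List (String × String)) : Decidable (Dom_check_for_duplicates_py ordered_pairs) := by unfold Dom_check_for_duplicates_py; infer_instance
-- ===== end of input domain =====

-- B is an alternative decomposition of the same O(n) task: a frequency table of keys first,
-- then one in-order pass inserting each key once, at its first occurrence, with its final value.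

-- ===== PORT A =====
-- A: d = {}; for k, v in ordered_pairs: d[k] = "Duplicated key" if k in d else v; return d
def check_for_duplicates_py (ordered_pairs : List (String × String)) : List (String × String) :=
  (ordered_pairs.foldl
    (fun d p =>
      if d.contains p.1 then d.insert p.1 "Duplicated key" else d.insert p.1 p.2)
    (PySem.Dict.empty : PySem.Dict String String)).items

-- ===== PORT B =====
-- B: counts[k] = counts.get(k, 0) + 1 over all pairs; then
--    for k, v in pairs: if k not in d: d[k] = v if counts[k] == 1 else "Duplicated key"
def check_for_duplicates_py_alt (ordered_pairs : List (String × String)) : List (String × String) :=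
  let counts : PySem.Dict String Int :=
    ordered_pairs.foldl (fun c p => c.insert p.1 (c.getD p.1 0 + 1)) PySem.Dict.empty
  (ordered_pairs.foldl
    (fun d p =>
      if d.contains p.1 then d
      else d.insert p.1 (if counts.getD p.1 0 == 1 then p.2 else "Duplicated key"))
    (PySem.Dict.empty : PySem.Dict String String)).items

-- ===== PRECONDITION & SPEC =====
def Spec_check_for_duplicates_py (ordered_pairs : List (String × String)) (out : List (String × String)) : Prop := out = check_for_duplicates_py_alt ordered_pairs
instance (ordered_pairs : List (String × String)) (out : List (String × String)) : Decidable (Spec_check_for_duplicates_py ordered_pairs out) := by unfold Spec_check_for_duplicates_py; infer_instance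

-- ===== CLAIM (what is proved, stated in full; the proofs are below) =====
def Claim_equal_check_for_duplicates_py : Prop := ∀ (ordered_pairs : List (String × String)), Dom_check_for_duplicates_py ordered_pairs → Spec_check_for_duplicates_py ordered_pairs (check_for_duplicates_py ordered_pairs)

-- ===== LEMMAS AND PROOFS =====

-- The common characterisation of both results: keys in first-occurrence order; a key occurring
-- once keeps its (first) value, a repeated key maps to "Duplicated key".
def pvModel (l : List (String × String)) : List (String × String) :=
  (PySem.Set.ofList (l.map Prod.fst)).map
    (fun k => (k, if (l.map Prod.fst).count k = 1 then (List.lookup k l).getD "" else "Duplicated key"))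

theorem pv_lookup_append_ne (k k' v : String) (l : List (String × String)) (h : ¬ k' = k) :
    List.lookup k' (l ++ [(k, v)]) = List.lookup k' l := by
  rw [List.lookup_append]
  have hb : (k' == k) = false := by simp [h]
  have : List.lookup k' [(k, v)] = none := by
    simp [List.lookup_cons, hb]
  simp [this]

theorem pv_keys_model (l : List (String × String)) :
    (PySem.Dict.mk (pvModel l)).keys = PySem.Set.ofList (l.map Prod.fst) := by
  simp [PySem.Dict.keys, pvModel, List.map_map, Function.comp_def]

theorem pvA_model (l : List (String × String)) :
    l.foldl
      (fun d p =>
        if d.contains p.1 then d.insert p.1 "Duplicated key" else d.insert p.1 p.2)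
      (PySem.Dict.empty : PySem.Dict String String) = PySem.Dict.mk (pvModel l) := by
  induction l using List.reverseRecOn with
  | nil => rfl
  | append_singleton l p ih =>
    obtain ⟨k, v⟩ := p
    rw [List.foldl_append, ih, List.foldl_cons, List.foldl_nil]
    have hcont : (PySem.Dict.mk (pvModel l)).contains k = decide (k ∈ l.map Prod.fst) := by
      rw [PySem.Dict.contains_eq_decide_mem_keys, pv_keys_model]
      simp [PySem.Set.mem_ofList]
    by_cases hk : k ∈ l.map Prod.fst
    · rw [hcont, if_pos (by simpa using hk)]
      apply PySem.Dict.ext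
      rw [PySem.Dict.items_insert_of_contains _ _ (by rw [hcont]; simpa using hk)]
      show (pvModel l).map _ = pvModel (l ++ [(k, v)])
      have hS : PySem.Set.ofList ((l ++ [(k, v)]).map Prod.fst) = PySem.Set.ofList (l.map Prod.fst) := by
        simp only [List.map_append, List.map_cons, List.map_nil]
        rw [PySem.Set.ofList_append_singleton,
            PySem.Set.add_of_mem (by rwa [PySem.Set.mem_ofList])]
      unfold pvModel
      rw [hS, List.map_map]
      apply List.map_congr_left
      intro k' hk'
      by_cases hkk : k' = k
      · subst hkk
        have h1 : 0 < (l.map Prod.fst).count k' := List.count_pos_iff.mpr hk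
        simp only [Function.comp]
        have hc : ((l ++ [(k', v)]).map Prod.fst).count k' = (l.map Prod.fst).count k' + 1 := by
          simp [List.count_append]
        have h0 : ¬ (l.map Prod.fst).count k' = 0 := by omega
        simp [h0]
      · have hkk2 : ¬ k = k' := fun h => hkk h.symm
        have hc : ((l ++ [(k, v)]).map Prod.fst).count k' = (l.map Prod.fst).count k' := by
          simp [List.count_append, hkk2]
        simp only [Function.comp]
        rw [hc, pv_lookup_append_ne k k' v l hkk]
        simp [hkk]
    · rw [hcont, if_neg (by simpa using hk)]
      apply PySem.Dict.ext
      rw [PySem.Dict.items_insert_of_not_contains _ _ (by rw [hcont]; simpa using hk)]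
      show pvModel l ++ [(k, v)] = pvModel (l ++ [(k, v)])
      have hS : PySem.Set.ofList ((l ++ [(k, v)]).map Prod.fst)
          = PySem.Set.ofList (l.map Prod.fst) ++ [k] := by
        simp only [List.map_append, List.map_cons, List.map_nil]
        rw [PySem.Set.ofList_append_singleton,
            PySem.Set.add_of_not_mem (by rwa [PySem.Set.mem_ofList])]
      unfold pvModel
      rw [hS, List.map_append]
      congr 1
      · apply List.map_congr_left
        intro k' hk'
        have hkk : ¬ k' = k := fun h => hk ((PySem.Set.mem_ofList _ _).mp (h ▸ hk'))
        have hkk2 : ¬ k = k' := fun h => hkk h.symm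
        have hc : ((l ++ [(k, v)]).map Prod.fst).count k' = (l.map Prod.fst).count k' := by
          simp [List.count_append, hkk2]
        rw [hc, pv_lookup_append_ne k k' v l hkk]
      · have hc0 : (l.map Prod.fst).count k = 0 := List.count_eq_zero.mpr hk
        have hc : ((l ++ [(k, v)]).map Prod.fst).count k = 1 := by
          simp [List.count_append, hc0]
        have hlk : List.lookup k l = none := by
          rw [List.lookup_eq_none_iff]
          intro p hp
          simp only [bne_iff_ne, ne_eq]
          intro h; exact hk (by rw [h]; exact List.mem_map_of_mem hp)
        simp [List.map_append, List.count_append, hc0, List.lookup_append, hlk, List.lookup_cons]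

theorem pvB_model (c : PySem.Dict String Int) (l : List (String × String)) :
    l.foldl
      (fun d p =>
        if d.contains p.1 then d
        else d.insert p.1 (if c.getD p.1 0 == 1 then p.2 else "Duplicated key"))
      (PySem.Dict.empty : PySem.Dict String String)
    = PySem.Dict.mk
        ((PySem.Set.ofList (l.map Prod.fst)).map
          (fun k => (k, if c.getD k 0 == 1 then (List.lookup k l).getD "" else "Duplicated key"))) := by
  induction l using List.reverseRecOn with
  | nil => rfl
  | append_singleton l p ih =>
    obtain ⟨k, v⟩ := p
    rw [List.foldl_append, ih, List.foldl_cons, List.foldl_nil]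
    have hkeys : (PySem.Dict.mk ((PySem.Set.ofList (l.map Prod.fst)).map
        (fun k => (k, if c.getD k 0 == 1 then (List.lookup k l).getD "" else "Duplicated key")))).contains k
        = decide (k ∈ l.map Prod.fst) := by
      rw [PySem.Dict.contains_eq_decide_mem_keys]
      simp [PySem.Dict.keys, List.map_map, Function.comp, PySem.Set.mem_ofList]
    by_cases hk : k ∈ l.map Prod.fst
    · rw [hkeys, if_pos (by simpa using hk)]
      apply PySem.Dict.ext
      show _ = List.map _ _
      have hS : PySem.Set.ofList ((l ++ [(k, v)]).map Prod.fst) = PySem.Set.ofList (l.map Prod.fst) := by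
        simp only [List.map_append, List.map_cons, List.map_nil]
        rw [PySem.Set.ofList_append_singleton,
            PySem.Set.add_of_mem (by rwa [PySem.Set.mem_ofList])]
      rw [hS]
      apply List.map_congr_left
      intro k' hk'
      by_cases hkk : k' = k
      · subst hkk
        have : (List.lookup k' (l ++ [(k', v)])).getD "" = (List.lookup k' l).getD "" := by
          have hs : (List.lookup k' l).isSome := by
            rw [List.lookup_isSome_iff]
            obtain ⟨p, hp, hfst⟩ := List.mem_map.mp hk
            exact ⟨p, hp, by simp [hfst]⟩
          rw [List.lookup_append]
          cases hh : List.lookup k' l with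
          | none => rw [hh] at hs; simp at hs
          | some w => simp
        rw [this]
      · rw [pv_lookup_append_ne k k' v l hkk]
    · rw [hkeys, if_neg (by simpa using hk)]
      apply PySem.Dict.ext
      rw [PySem.Dict.items_insert_of_not_contains _ _ (by rw [hkeys]; simpa using hk)]
      show List.map _ _ ++ [(k, _)] = List.map _ _
      have hS : PySem.Set.ofList ((l ++ [(k, v)]).map Prod.fst)
          = PySem.Set.ofList (l.map Prod.fst) ++ [k] := by
        simp only [List.map_append, List.map_cons, List.map_nil]
        rw [PySem.Set.ofList_append_singleton,
            PySem.Set.add_of_not_mem (by rwa [PySem.Set.mem_ofList])]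
      rw [hS, List.map_append]
      congr 1
      · apply List.map_congr_left
        intro k' hk'
        have hkk : ¬ k' = k := fun h => hk ((PySem.Set.mem_ofList _ _).mp (h ▸ hk'))
        rw [pv_lookup_append_ne k k' v l hkk]
      · have hlk : List.lookup k l = none := by
          rw [List.lookup_eq_none_iff]
          intro p hp
          simp only [bne_iff_ne, ne_eq]
          intro h; exact hk (by rw [h]; exact List.mem_map_of_mem hp)
        simp [List.lookup_append, hlk, List.lookup_cons]

-- ===== VERDICT (by name: the statement is the Claim_ definition above) =====
theorem check_for_duplicates_py_spec : Claim_equal_check_for_duplicates_py := by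
  intro l _
  unfold Spec_check_for_duplicates_py check_for_duplicates_py check_for_duplicates_py_alt
  simp only []
  rw [pvA_model, pvB_model]
  show pvModel l = _
  unfold pvModel
  apply List.map_congr_left
  intro k hk
  have hc : (List.foldl (fun c p => c.insert p.1 (c.getD p.1 0 + 1))
      (PySem.Dict.empty : PySem.Dict String Int) l).getD k 0 = ((l.map Prod.fst).count k : Int) := by
    rw [← List.foldl_map (f := Prod.fst)
        (g := fun (d : PySem.Dict String Int) x => d.insert x (d.getD x 0 + 1)),
        PySem.Dict.getD_foldl_insert_add_one]
    simp [PySem.Dict.getD_empty]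
  rw [hc]
  congr 1
  by_cases h1 : (l.map Prod.fst).count k = 1
  · simp [h1]
  · have : ¬ (((l.map Prod.fst).count k : Int) == 1) = true := by
      simp only [beq_iff_eq]
      exact_mod_cast h1
    simp [h1, this]
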